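-- pv_equiv track=rewrite | github.com/ronaldpedra/beecrowd | INICIANTE/python/Pagina_2/1066.py | tipo_dos_numeros
-- ===== SOURCE A (Python) =====
-- def tipo_dos_numeros(valores: list):
--     '''Retorna os tipos de números'''
--     pares = 0
--     impares = 0
--     positivos = 0
--     negativos = 0
--
--     for valor in valores:
--         if valor % 2 == 0:
--             pares += 1
--         else:
--             impares += 1
--         if valor > 0:
--             positivos += 1
--         elif valor < 0:
--             negativos += 1
--
--     return pares, impares, positivos, negativos
-- ===== SOURCE B (Python) =====
-- def tipo_dos_numeros(valores: list):
--     '''Retorna os tipos de números'''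
--     pares = sum(1 for v in valores if v % 2 == 0)
--     impares = len(valores) - pares
--     positivos = sum(1 for v in valores if v > 0)
--     negativos = sum(1 for v in valores if v < 0)
--     return pares, impares, positivos, negativos
-- ===== Notes on version B (the rewrite author's own statement) =====
-- stated objective: idiomatic
-- what changed: Replaces the single loop with four mutable accumulators by independent per-category counting passes (sum over generator expressions), with impares derived as len minus pares instead of being counted.
import Mathlib
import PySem

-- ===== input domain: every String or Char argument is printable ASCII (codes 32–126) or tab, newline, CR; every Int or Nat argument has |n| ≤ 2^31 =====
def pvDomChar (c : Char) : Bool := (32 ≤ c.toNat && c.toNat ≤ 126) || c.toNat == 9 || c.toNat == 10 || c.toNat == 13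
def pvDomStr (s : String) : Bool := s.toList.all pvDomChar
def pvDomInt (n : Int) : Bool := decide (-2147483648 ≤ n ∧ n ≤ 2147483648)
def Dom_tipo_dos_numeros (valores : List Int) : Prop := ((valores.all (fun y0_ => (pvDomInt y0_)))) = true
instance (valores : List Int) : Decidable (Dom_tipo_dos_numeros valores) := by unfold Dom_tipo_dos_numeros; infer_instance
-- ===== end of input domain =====

-- B replaces A's single loop with four accumulators by independent per-category counting passes (impares derived as len - pares); objective: idiomatic, same O(n) cost.


-- ===== PORT A =====
-- shared predicates: Python 'v % 2 == 0' (divisor 2 > 0, so PySem.Int.mod is exact), 'v > 0', 'v < 0'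
def pvEven (v : Int) : Bool := decide (PySem.Int.mod v 2 = 0)
def pvPos (v : Int) : Bool := decide (v > 0)
def pvNeg (v : Int) : Bool := decide (v < 0)

-- literal port of A: one pass, four accumulators
def tipo_dos_numeros (valores : List Int) : Int × Int × Int × Int :=
  valores.foldl
    (fun (st : Int × Int × Int × Int) valor =>
      let (pares, impares, positivos, negativos) := st
      let (pares, impares) :=
        if pvEven valor then (pares + 1, impares) else (pares, impares + 1)
      let (positivos, negativos) :=
        if pvPos valor then (positivos + 1, negativos)
        else if pvNeg valor then (positivos, negativos + 1)
        else (positivos, negativos)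
      (pares, impares, positivos, negativos))
    (0, 0, 0, 0)

-- ===== PORT B =====
-- port of B: one independent counting pass per category; impares = len - pares
def tipo_dos_numeros_alt (valores : List Int) : Int × Int × Int × Int :=
  let pares : Int := (valores.countP pvEven : Nat)
  let impares : Int := (valores.length : Int) - pares
  let positivos : Int := (valores.countP pvPos : Nat)
  let negativos : Int := (valores.countP pvNeg : Nat)
  (pares, impares, positivos, negativos)

-- ===== PRECONDITION & SPEC =====
def Spec_tipo_dos_numeros (valores : List Int) (out : Int × Int × Int × Int) : Prop := out = tipo_dos_numeros_alt valores
instance (valores : List Int) (out : Int × Int × Int × Int) : Decidable (Spec_tipo_dos_numeros valores out) := by unfold Spec_tipo_dos_numeros; infer_instance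

-- ===== CLAIM (what is proved, stated in full; the proofs are below) =====
def Claim_equal_tipo_dos_numeros : Prop := ∀ (valores : List Int), Dom_tipo_dos_numeros valores → Spec_tipo_dos_numeros valores (tipo_dos_numeros valores)

-- ===== LEMMAS AND PROOFS =====

-- ===== VERDICT (by name: the statement is the Claim_ definition above) =====
lemma fold_counts (valores : List Int) (p i pos neg : Int) :
    valores.foldl
      (fun (st : Int × Int × Int × Int) valor =>
        let (pares, impares, positivos, negativos) := st
        let (pares, impares) :=
          if pvEven valor then (pares + 1, impares) else (pares, impares + 1)
        let (positivos, negativos) :=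
          if pvPos valor then (positivos + 1, negativos)
          else if pvNeg valor then (positivos, negativos + 1)
          else (positivos, negativos)
        (pares, impares, positivos, negativos))
      (p, i, pos, neg)
    = (p + (valores.countP pvEven : Nat),
       i + ((valores.countP (fun v => ! pvEven v) : Nat)),
       pos + (valores.countP pvPos : Nat),
       neg + (valores.countP pvNeg : Nat)) := by
  induction valores generalizing p i pos neg with
  | nil => simp
  | cons x xs ih =>
      simp only [List.foldl_cons, List.countP_cons, ih]
      by_cases hm : pvEven x = true <;>
      by_cases hp : pvPos x = true <;>
      by_cases hn : pvNeg x = true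
      all_goals
        first
        | (exfalso; simp only [pvPos, pvNeg, decide_eq_true_eq] at hp hn; omega)
        | (simp only [hm, hp, hn, Bool.not_true, Bool.not_false, if_true, if_false,
              Bool.false_eq_true]
           refine Prod.ext ?_ (Prod.ext ?_ (Prod.ext ?_ ?_)) <;> push_cast <;> ring)

lemma countP_not_even (valores : List Int) :
    (valores.countP (fun v => ! pvEven v) : Int)
      = (valores.length : Int) - (valores.countP pvEven : Nat) := by
  induction valores with
  | nil => simp
  | cons x xs ih =>
      simp only [List.countP_cons, List.length_cons]
      by_cases hm : pvEven x = true <;>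
        simp only [hm, Bool.not_true, Bool.not_false, Bool.false_eq_true, reduceIte] <;>
        omega

theorem tipo_dos_numeros_spec : Claim_equal_tipo_dos_numeros := by
  intro valores _
  show tipo_dos_numeros valores = tipo_dos_numeros_alt valores
  simp only [tipo_dos_numeros, tipo_dos_numeros_alt, fold_counts, countP_not_even]
  ring_nf
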